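-- pv_equiv track=rewrite | github.com/yanshengjia/algorithm | lintcode/String/956. Data Segmentation.py | dataSegmentation
-- ===== SOURCE A (Python) =====
-- def dataSegmentation(str):
--     # Write your code here
--     res = []
--     if len(str) == 0:
--         return res
--     tmp = ''
--     for i in range(len(str)):
--         if str[i].isalpha():
--             tmp += str[i]
--         else:
--             if len(tmp) > 0:
--                 res.append(tmp)
--                 tmp = ''
--
--             if str[i] != ' ':
--                 res.append(str[i])
--     if len(tmp) > 0:
--         res.append(tmp)
--     return res
-- ===== SOURCE B (Python) =====
-- from itertools import groupby
--
-- def dataSegmentation(str):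
--     res = []
--     for is_alpha, run in groupby(str, key=lambda c: c.isalpha()):
--         if is_alpha:
--             res.append(''.join(run))
--         else:
--             res.extend(c for c in run if c != ' ')
--     return res
-- ===== Notes on version B (the rewrite author's own statement) =====
-- stated objective: idiomatic
-- what changed: Replaces the hand-rolled per-character accumulator loop with itertools.groupby over isalpha, joining alphabetic runs wholesale and filtering spaces out of separator runs.
import Mathlib
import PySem

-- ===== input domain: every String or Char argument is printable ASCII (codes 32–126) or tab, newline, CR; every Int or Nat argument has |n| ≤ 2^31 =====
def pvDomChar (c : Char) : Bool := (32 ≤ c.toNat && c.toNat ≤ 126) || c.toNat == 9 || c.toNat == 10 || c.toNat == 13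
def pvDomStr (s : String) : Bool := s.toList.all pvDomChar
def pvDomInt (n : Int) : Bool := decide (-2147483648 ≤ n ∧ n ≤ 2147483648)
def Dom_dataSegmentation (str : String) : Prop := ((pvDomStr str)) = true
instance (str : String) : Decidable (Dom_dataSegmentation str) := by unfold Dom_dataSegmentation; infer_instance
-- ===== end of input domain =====

-- B replaces A's per-character accumulator loop by a run-based (groupby-style) decomposition; objective: idiomatic.


-- ===== PORT A =====
def aStep (st : List String × List Char) (c : Char) : List String × List Char :=
  if PySem.Chars.isalpha c then (st.1, st.2 ++ [c])
  else
    let res := if st.2.length > 0 then st.1 ++ [String.mk st.2] else st.1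
    if c != ' ' then (res ++ [String.mk [c]], []) else (res, [])

def dataSegmentation (str : String) : List String :=
  if str.toList.length = 0 then []
  else
    let st := str.toList.foldl aStep ([], [])
    if st.2.length > 0 then st.1 ++ [String.mk st.2] else st.1

-- ===== PORT B =====
-- groupby-style: peel one maximal run (alphabetic or not) at a time
def altGo : List Char → List String
  | [] => []
  | c :: cs =>
    if PySem.Chars.isalpha c then
      String.mk ((c :: cs).takeWhile PySem.Chars.isalpha) ::
        altGo ((c :: cs).dropWhile PySem.Chars.isalpha)
    else
      (((c :: cs).takeWhile (fun x => !PySem.Chars.isalpha x)).filter (fun ch => ch != ' ')).map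
          (fun ch => String.mk [ch]) ++
        altGo ((c :: cs).dropWhile (fun x => !PySem.Chars.isalpha x))
termination_by cs => cs.length
decreasing_by
  · simp only [List.dropWhile_cons, *, if_pos]
    exact Nat.lt_succ_of_le (List.length_dropWhile_le _ _)
  · simp only [List.dropWhile_cons, *, if_pos, Bool.not_false]
    exact Nat.lt_succ_of_le (List.length_dropWhile_le _ _)

def dataSegmentation_alt (str : String) : List String := altGo str.toList

-- ===== PRECONDITION & SPEC =====
def Spec_dataSegmentation (str : String) (out : List String) : Prop := out = dataSegmentation_alt str
instance (str : String) (out : List String) : Decidable (Spec_dataSegmentation str out) := by unfold Spec_dataSegmentation; infer_instance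

-- ===== CLAIM (what is proved, stated in full; the proofs are below) =====
def Claim_equal_dataSegmentation : Prop := ∀ (str : String), Dom_dataSegmentation str → Spec_dataSegmentation str (dataSegmentation str)

-- ===== LEMMAS AND PROOFS =====

theorem altGo_all_alpha (tmp : List Char) (h : ∀ c ∈ tmp, PySem.Chars.isalpha c = true) :
    altGo tmp = if tmp.length > 0 then [String.mk tmp] else [] := by
  cases tmp with
  | nil => simp [altGo]
  | cons c cs =>
    have hc : PySem.Chars.isalpha c = true := h c (by simp)
    rw [altGo]
    rw [if_pos hc, List.takeWhile_eq_self_iff.2 h, List.dropWhile_eq_nil_iff.2 (fun x hx => h x hx)]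
    simp [altGo]

-- peel one non-alpha char off the front of altGo
theorem altGo_cons_nonalpha (c : Char) (cs : List Char) (hc : PySem.Chars.isalpha c = false) :
    altGo (c :: cs) = (if c != ' ' then [String.mk [c]] else []) ++ altGo cs := by
  rw [altGo, if_neg (by simp [hc])]
  have htw : (c :: cs).takeWhile (fun x => !PySem.Chars.isalpha x)
      = c :: cs.takeWhile (fun x => !PySem.Chars.isalpha x) := by
    simp [List.takeWhile_cons, hc]
  have hdw : (c :: cs).dropWhile (fun x => !PySem.Chars.isalpha x)
      = cs.dropWhile (fun x => !PySem.Chars.isalpha x) := by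
    simp [List.dropWhile_cons, hc]
  rw [htw, hdw]
  cases cs with
  | nil => cases h : (c != ' ') <;> simp [altGo, List.filter, h]
  | cons d ds =>
    by_cases hd : PySem.Chars.isalpha d = true
    · rw [List.takeWhile_cons_of_neg (by simp [hd]), List.dropWhile_cons_of_neg (by simp [hd])]
      cases h : (c != ' ') <;> simp [List.filter, h]
    · have hd' : PySem.Chars.isalpha d = false := by simpa using hd
      conv_rhs => rw [altGo]
      simp only [hd', Bool.false_eq_true, if_false]
      cases h : (c != ' ') <;> simp [List.filter_cons, h]

theorem main_inv (cs : List Char) : ∀ (res : List String) (tmp : List Char),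
    (∀ c ∈ tmp, PySem.Chars.isalpha c = true) →
    (let st := cs.foldl aStep (res, tmp);
      if st.2.length > 0 then st.1 ++ [String.mk st.2] else st.1) = res ++ altGo (tmp ++ cs) := by
  induction cs with
  | nil =>
    intro res tmp h
    simp only [List.foldl_nil, List.append_nil]
    rw [altGo_all_alpha tmp h]
    split <;> simp
  | cons c cs ih =>
    intro res tmp h
    by_cases hc : PySem.Chars.isalpha c = true
    · have : aStep (res, tmp) c = (res, tmp ++ [c]) := by simp [aStep, hc]
      simp only [List.foldl_cons, this]
      rw [ih res (tmp ++ [c]) (by intro x hx; rcases List.mem_append.1 hx with h1 | h1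
                                  · exact h x h1
                                  · simp at h1; subst h1; exact hc)]
      simp
    · have hc' : PySem.Chars.isalpha c = false := by simpa using hc
      have hstep : aStep (res, tmp) c =
          ((if tmp.length > 0 then res ++ [String.mk tmp] else res)
            ++ (if c != ' ' then [String.mk [c]] else []), []) := by
        simp only [aStep, hc', Bool.false_eq_true, if_false]
        cases h2 : (c != ' ') <;> simp [h2]
      simp only [List.foldl_cons, hstep]
      rw [ih _ [] (by intro x hx; simp at hx)]
      have halpha : altGo (tmp ++ c :: cs)
          = (if tmp.length > 0 then [String.mk tmp] else [])
            ++ (if c != ' ' then [String.mk [c]] else []) ++ altGo cs := by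
        cases tmp with
        | nil => simp [altGo_cons_nonalpha c cs hc']
        | cons t ts =>
          have ht : PySem.Chars.isalpha t = true := h t (by simp)
          have htw : ((t :: ts) ++ c :: cs).takeWhile PySem.Chars.isalpha = t :: ts := by
            rw [List.takeWhile_append]
            rw [List.takeWhile_eq_self_iff.2 h]
            simp [List.takeWhile_cons, hc']
          have hdw : ((t :: ts) ++ c :: cs).dropWhile PySem.Chars.isalpha = c :: cs := by
            rw [List.dropWhile_append]
            rw [List.dropWhile_eq_nil_iff.2 (fun x hx => h x hx)]
            simp [List.dropWhile_cons, hc']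
          simp only [List.cons_append] at htw hdw ⊢
          rw [altGo, if_pos ht, htw, hdw, altGo_cons_nonalpha c cs hc']
          simp
      rw [halpha]
      split <;> cases h2 : (c != ' ') <;> simp_all

-- ===== VERDICT (by name: the statement is the Claim_ definition above) =====
theorem dataSegmentation_spec : Claim_equal_dataSegmentation := by
  intro s _
  unfold Spec_dataSegmentation dataSegmentation dataSegmentation_alt
  by_cases h : s.toList.length = 0
  · rw [if_pos h]
    rw [List.length_eq_zero_iff.1 h]
    simp [altGo]
  · rw [if_neg h]
    have := main_inv s.toList [] [] (by intro x hx; simp at hx)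
    simpa using this
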